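-- pv_equiv track=rewrite | github.com/AllUNeeedIsLove/PTHWG | PR2G.py | DaysSum
-- ===== SOURCE A (Python) =====
-- def DaysSum(Days):
--     temp = 0
--     for i in range(Days + 1):
--         if i<10:
--             temp = temp + i
--         else:
--             Daysstr = str(i)
--             Dayssymb = list(Daysstr)
--             temp = temp + int(Dayssymb[0]) + int(Dayssymb[1])
--     return temp
-- ===== SOURCE B (Python) =====
-- def digit_len(n):
--     # number of decimal digits of n >= 0
--     l = 1
--     while n >= 10:
--         n //= 10
--         l += 1
--     return l
--
--
-- def DaysSum(Days):
--     if Days < 10: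
--         return Days * (Days + 1) // 2 if Days >= 0 else 0
--     total = 45
--     for k in range(digit_len(Days) - 1):
--         p10 = 10 ** k
--         for p in range(10, 100):
--             lo = p * p10
--             if lo <= Days:
--                 total += (p // 10 + p % 10) * (min(Days, lo + p10 - 1) - lo + 1)
--     return total
-- ===== Notes on version B (the rewrite author's own statement) =====
-- stated objective: faster
-- what changed: A loops over every i in 0..Days and extracts the first two decimal digits of each via str(); B sums 0..9 in closed form and then, for each digit-length level and each leading two-digit prefix 10..99, adds the constant per-element contribution times the size of that block clipped at Days, so the work is O(log Days) blocks instead of O(Days) iterations.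
import Mathlib
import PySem

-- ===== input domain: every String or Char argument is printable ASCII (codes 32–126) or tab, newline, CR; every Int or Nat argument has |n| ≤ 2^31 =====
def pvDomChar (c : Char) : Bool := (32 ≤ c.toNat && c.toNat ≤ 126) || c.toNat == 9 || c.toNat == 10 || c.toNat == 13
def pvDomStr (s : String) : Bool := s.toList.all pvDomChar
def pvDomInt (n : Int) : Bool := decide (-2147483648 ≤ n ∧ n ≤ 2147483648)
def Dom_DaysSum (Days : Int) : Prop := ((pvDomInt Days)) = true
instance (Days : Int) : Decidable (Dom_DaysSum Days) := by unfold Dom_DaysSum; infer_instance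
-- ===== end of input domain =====

-- B replaces A's per-day loop by a closed form for 0..9 plus, per digit-length level and
-- leading two-digit prefix, one constant-contribution block count clipped at Days (objective: faster).

-- ===== PORT A =====
-- int(Dayssymb[j]) for j = 0,1 is reached only when i ≥ 10, where str(i) has ≥ 2 chars, each a
-- decimal digit, so neither the indexing nor int() can raise; the total forms pyGetD/.getD 0
-- are exact there.
def DaysSum (Days : Int) : Int :=
  (PySem.List.pyRange 0 (Days + 1) 1).foldl
    (fun temp i =>
      if i < 10 then temp + i
      else
        let Daysstr := PySem.Int.toStr i
        let Dayssymb := Daysstr.toList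
        temp + (PySem.Int.ofChars? [PySem.List.pyGetD Dayssymb 0 ' ']).getD 0
             + (PySem.Int.ofChars? [PySem.List.pyGetD Dayssymb 1 ' ']).getD 0) 0

-- ===== PORT B =====
-- digit_len's while loop: structural recursion on n (n //= 10 strictly shrinks n.toNat while n ≥ 10)
def digitLen (n : Int) : Int :=
  if h : 10 ≤ n then digitLen (PySem.Int.floordiv n 10) + 1 else 1
termination_by n.toNat
decreasing_by
  rw [PySem.Int.floordiv_eq_ediv_of_pos (by norm_num : (0:Int) < 10)]
  omega

-- 10 ** k has k ≥ 0 (k ranges over range(digit_len(Days) - 1)), so (10:Int)^k.toNat is exact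
def DaysSum_alt (Days : Int) : Int :=
  if Days < 10 then
    (if 0 ≤ Days then PySem.Int.floordiv (Days * (Days + 1)) 2 else 0)
  else
    (PySem.List.pyRange 0 (digitLen Days - 1) 1).foldl
      (fun total k =>
        let p10 : Int := 10 ^ k.toNat
        (PySem.List.pyRange 10 100 1).foldl
          (fun total p =>
            let lo := p * p10
            if lo ≤ Days then
              total + (PySem.Int.floordiv p 10 + PySem.Int.mod p 10) *
                        (min Days (lo + p10 - 1) - lo + 1)
            else total) total) 45

-- ===== PRECONDITION & SPEC =====
def Spec_DaysSum (Days : Int) (out : Int) : Prop := out = DaysSum_alt Days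
instance (Days : Int) (out : Int) : Decidable (Spec_DaysSum Days out) := by unfold Spec_DaysSum; infer_instance

-- ===== CLAIM (what is proved, stated in full; the proofs are below) =====
def Claim_equal_DaysSum : Prop := ∀ (Days : Int), Dom_DaysSum Days → Spec_DaysSum Days (DaysSum Days)

-- ===== LEMMAS AND PROOFS =====

-- A's per-day contribution for i ≥ 10: first plus second decimal digit of str(i)
def scontrib (i : Int) : Int :=
  (PySem.Int.ofChars? [(PySem.Int.toChars i).getD 0 ' ']).getD 0
  + (PySem.Int.ofChars? [(PySem.Int.toChars i).getD 1 ' ']).getD 0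

-- sum of scontrib over the integer interval [a, b)
def S (a b : Int) : Int := ((PySem.List.pyRange a b 1).map scontrib).sum

theorem S_append {a m b : Int} (h1 : a ≤ m) (h2 : m ≤ b) : S a m + S m b = S a b := by
  unfold S
  rw [PySem.List.pyRange_one_append a m b h1 h2, List.map_append, List.sum_append]

theorem S_self (a : Int) : S a a = 0 := by
  unfold S
  rw [PySem.List.pyRange_one_eq_nil le_rfl]
  rfl

theorem toChars_natCast (m : Nat) : PySem.Int.toChars (m : Int) = Nat.toDigits 10 m := by
  simp [PySem.Int.toChars]

-- the first two entries are unchanged by appending one char to a list of length ≥ 2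
theorem first2_append (l : List Char) (x : Char) (h : 2 ≤ l.length) (j : Nat) (hj : j < 2) :
    (l ++ [x]).getD j ' ' = l.getD j ' ' := by
  rcases l with _ | ⟨a, _ | ⟨b, t⟩⟩
  · simp at h
  · simp at h
  · interval_cases j <;> simp

-- two-digit base case: for 10 ≤ p < 100, scontrib p = p / 10 + p % 10
theorem scontrib_two_digit (p : Nat) (h1 : 10 ≤ p) (h2 : p < 100) :
    scontrib (p : Int) = ((p / 10 : Nat) : Int) + ((p % 10 : Nat) : Int) := by
  interval_cases p <;> decide

-- block lemma: every m in [p * 10^k, (p+1) * 10^k) has the same leading two digits as p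
theorem scontrib_block (k p m : Nat) (h1 : 10 ≤ p) (h2 : p < 100)
    (hlo : p * 10 ^ k ≤ m) (hhi : m < (p + 1) * 10 ^ k) :
    scontrib (m : Int) = ((p / 10 : Nat) : Int) + ((p % 10 : Nat) : Int) := by
  induction k generalizing m with
  | zero =>
    simp only [pow_zero, mul_one] at hlo hhi
    have hmp : m = p := by omega
    rw [hmp]
    exact scontrib_two_digit p h1 h2
  | succ k ih =>
    have hpowpos : 0 < 10 ^ k := pow_pos (by norm_num) k
    have hm100 : 100 * 10 ^ k ≤ m := by
      calc 100 * 10 ^ k ≤ p * (10 ^ k * 10) := by nlinarith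
      _ = p * 10 ^ (k + 1) := by ring
      _ ≤ m := hlo
    have hm10 : 10 ≤ m := by nlinarith
    have hdiv_lo : p * 10 ^ k ≤ m / 10 := by
      rw [Nat.le_div_iff_mul_le (by norm_num)]
      calc p * 10 ^ k * 10 = p * 10 ^ (k + 1) := by ring
      _ ≤ m := hlo
    have hdiv_hi : m / 10 < (p + 1) * 10 ^ k := by
      rw [Nat.div_lt_iff_lt_mul (by norm_num)]
      calc m < (p + 1) * 10 ^ (k + 1) := hhi
      _ = (p + 1) * 10 ^ k * 10 := by ring
    have hrec := ih (m / 10) hdiv_lo hdiv_hi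
    have hq10 : 10 ≤ m / 10 := by
      rw [Nat.le_div_iff_mul_le (by norm_num)]; nlinarith
    have hlen : 2 ≤ (Nat.toDigits 10 (m / 10)).length := by
      by_contra hcon
      have := (Nat.length_toDigits_le_iff (b := 10) (n := m / 10) (k := 1)
        (by norm_num) (by norm_num)).mp (by omega)
      omega
    have hstep := Nat.toDigits_of_base_le (b := 10) (n := m) (by norm_num) hm10
    unfold scontrib at hrec ⊢
    rw [toChars_natCast] at hrec ⊢
    rw [hstep, first2_append _ _ hlen 0 (by norm_num), first2_append _ _ hlen 1 (by norm_num)]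
    exact hrec

-- constant-block sum
theorem S_const_block (a b : Int) (v : Int) (hab : a ≤ b)
    (hv : ∀ i : Int, a ≤ i → i < b → scontrib i = v) :
    S a b = v * (b - a) := by
  unfold S
  have hmap : List.map scontrib (PySem.List.pyRange a b 1)
      = List.map (fun _ => v) (PySem.List.pyRange a b 1) :=
    List.map_congr_left (fun i hi => by
      rw [PySem.List.mem_pyRange_one] at hi
      exact hv i hi.1 hi.2)
  rw [hmap, PySem.List.sum_map_const_int, PySem.List.length_pyRange_one,
      Int.toNat_of_nonneg (by omega)]
  ring

-- inner loop over prefixes p ∈ [10, 10 + j): running sum of clipped blocks at level k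
theorem inner_loop (M : Int) (k : Nat) (j : Nat) (hj : j ≤ 90) (t : Int) :
    (PySem.List.pyRange 10 (10 + (j : Int)) 1).foldl
      (fun total p =>
        let lo := p * (10 : Int) ^ k
        if lo ≤ M then
          total + (PySem.Int.floordiv p 10 + PySem.Int.mod p 10) *
                    (min M (lo + (10 : Int) ^ k - 1) - lo + 1)
        else total) t
    = t + S (min (M + 1) (10 * 10 ^ k)) (min (M + 1) ((10 + (j : Int)) * 10 ^ k)) := by
  induction j generalizing t with
  | zero =>
    simp only [Nat.cast_zero, add_zero]
    rw [PySem.List.pyRange_one_eq_nil le_rfl]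
    simp [S_self]
  | succ j ih =>
    have hp : (10 : Int) ≤ 10 + (j : Int) := by omega
    have hpow : (0 : Int) < 10 ^ k := pow_pos (by norm_num) k
    rw [(by push_cast; ring : (10 : Int) + ((j + 1 : Nat) : Int) = (10 + (j : Int)) + 1),
        PySem.List.pyRange_one_succ_right hp, List.foldl_append, ih (by omega) t]
    set P : Int := 10 + (j : Int) with hP
    have hmono : 10 * 10 ^ k ≤ P * 10 ^ k := by nlinarith
    have hmono1 : P * 10 ^ k + 10 ^ k = (P + 1) * 10 ^ k := by ring
    simp only [List.foldl_cons, List.foldl_nil]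
    by_cases hcase : P * 10 ^ k ≤ M
    · rw [if_pos hcase]
      have hcast : ((10 + j : Nat) : Int) = P := by push_cast; omega
      have hfd : PySem.Int.floordiv P 10 + PySem.Int.mod P 10
          = (((10 + j) / 10 : Nat) : Int) + (((10 + j) % 10 : Nat) : Int) := by
        rw [← hcast, (by norm_cast : (10 : Int) = ((10 : Nat) : Int)),
            PySem.Int.floordiv_natCast, PySem.Int.mod_natCast]
      have hblock : S (P * 10 ^ k) (min (M + 1) ((P + 1) * 10 ^ k))
          = ((((10 + j) / 10 : Nat) : Int) + (((10 + j) % 10 : Nat) : Int))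
            * (min (M + 1) ((P + 1) * 10 ^ k) - P * 10 ^ k) := by
        apply S_const_block
        · omega
        intro i hi1 hi2
        have hi2' : i < (P + 1) * 10 ^ k := lt_of_lt_of_le hi2 (min_le_right _ _)
        have hi0 : 0 ≤ i := le_trans (by positivity) hi1
        have hcastpow : (((10 ^ k : Nat)) : Int) = (10 : Int) ^ k := by push_cast; ring
        have h1n : (10 + j) * 10 ^ k ≤ i.toNat := by
          rw [Int.le_toNat hi0]
          push_cast
          calc ((10 : Int) + j) * 10 ^ k = P * 10 ^ k := by rw [hP]
          _ ≤ i := hi1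
        have h2n : i.toNat < ((10 + j) + 1) * 10 ^ k := by
          rw [Int.toNat_lt hi0]
          push_cast
          calc i < (P + 1) * 10 ^ k := hi2'
          _ = ((10 : Int) + j + 1) * 10 ^ k := by rw [hP]
        have := scontrib_block k (10 + j) i.toNat (by omega) (by omega) h1n h2n
        rwa [Int.toNat_of_nonneg hi0] at this
      have hminP : min (M + 1) (P * 10 ^ k) = P * 10 ^ k := by omega
      have harg : min M (P * 10 ^ k + 10 ^ k - 1) - P * 10 ^ k + 1
          = min (M + 1) ((P + 1) * 10 ^ k) - P * 10 ^ k := by omega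
      have hjoin := S_append (a := min (M + 1) (10 * 10 ^ k)) (m := P * 10 ^ k)
        (b := min (M + 1) ((P + 1) * 10 ^ k)) (by omega) (by omega)
      rw [hfd, hminP, harg]
      linarith [hjoin, hblock]
    · rw [if_neg hcase]
      have h1 : min (M + 1) (P * 10 ^ k) = M + 1 := by omega
      have h2 : min (M + 1) ((P + 1) * 10 ^ k) = M + 1 := by omega
      rw [h1, h2]

-- outer loop over levels 0..K-1: accumulates S 10 (min (M+1) 10^(K+1))
theorem outer_loop (M : Int) (hM : 9 ≤ M) (K : Nat) (t : Int) :
    (PySem.List.pyRange 0 (K : Int) 1).foldl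
      (fun total k =>
        let p10 : Int := 10 ^ k.toNat
        (PySem.List.pyRange 10 100 1).foldl
          (fun total p =>
            let lo := p * p10
            if lo ≤ M then
              total + (PySem.Int.floordiv p 10 + PySem.Int.mod p 10) *
                        (min M (lo + p10 - 1) - lo + 1)
            else total) total) t
    = t + S 10 (min (M + 1) (10 ^ (K + 1))) := by
  induction K generalizing t with
  | zero =>
    rw [(by norm_num : ((0 : Nat) : Int) = 0), PySem.List.pyRange_one_eq_nil le_rfl]
    have : min (M + 1) ((10 : Int) ^ (0 + 1)) = 10 := by simp; omega
    simp only [List.foldl_nil, this, S_self, add_zero]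
  | succ K ih =>
    rw [(by push_cast; ring : ((K + 1 : Nat) : Int) = (K : Int) + 1),
        PySem.List.pyRange_one_succ_right (by positivity), List.foldl_append, ih t]
    simp only [List.foldl_cons, List.foldl_nil]
    have htn : ((K : Int)).toNat = K := Int.toNat_natCast K
    rw [htn]
    have h100 : (100 : Int) = 10 + ((90 : Nat) : Int) := by norm_num
    rw [h100, inner_loop M K 90 (by norm_num)]
    have e1 : (10 : Int) * 10 ^ K = 10 ^ (K + 1) := by ring
    have e2 : (10 + ((90 : Nat) : Int)) * 10 ^ K = 10 ^ (K + 1 + 1) := by push_cast; ring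
    rw [e1, e2]
    have hpowK : (10 : Int) ≤ 10 ^ (K + 1) := by
      calc (10 : Int) = 10 ^ 1 := by ring
      _ ≤ 10 ^ (K + 1) := pow_le_pow_right₀ (by norm_num) (by omega)
    have hpowKK : (10 : Int) ^ (K + 1) ≤ 10 ^ (K + 1 + 1) := pow_le_pow_right₀ (by norm_num) (by omega)
    have hjoin := S_append (a := 10) (m := min (M + 1) (10 ^ (K + 1)))
      (b := min (M + 1) (10 ^ (K + 1 + 1))) (by omega) (by omega)
    omega

-- digit_len bounds: L ≥ 1 and 10^(L-1) ≤ n < 10^L for n ≥ 1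
theorem digitLen_bounds_aux (N : Nat) : ∀ n : Int, 1 ≤ n → n.toNat ≤ N →
    1 ≤ digitLen n ∧ (10 : Int) ^ (digitLen n - 1).toNat ≤ n ∧ n < 10 ^ (digitLen n).toNat := by
  induction N with
  | zero => intro n h1 h2; omega
  | succ N ih =>
    intro n h1 h2
    rw [digitLen]
    by_cases h10 : (10 : Int) ≤ n
    · rw [dif_pos h10]
      have hq : PySem.Int.floordiv n 10 = n / 10 :=
        PySem.Int.floordiv_eq_ediv_of_pos (b := 10) (a := n) (by norm_num)
      rw [hq]
      obtain ⟨hd1, hd2, hd3⟩ := ih (n / 10) (by omega) (by omega)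
      set d := digitLen (n / 10) with hd
      have ht1 : (d + 1 - 1).toNat = (d - 1).toNat + 1 := by omega
      have ht2 : (d + 1).toNat = d.toNat + 1 := by omega
      have ht3 : d.toNat = (d - 1).toNat + 1 := by omega
      rw [ht1, ht2]
      have e1 : (10 : Int) ^ ((d - 1).toNat + 1) = 10 * 10 ^ (d - 1).toNat := by ring
      have e2 : (10 : Int) ^ (d.toNat + 1) = 10 * 10 ^ d.toNat := by ring
      have e3 : (10 : Int) ^ d.toNat = 10 * 10 ^ (d - 1).toNat := by rw [ht3]; ring
      omega
    · rw [dif_neg h10]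
      norm_num
      omega

theorem digitLen_bounds (n : Int) (h : 1 ≤ n) :
    1 ≤ digitLen n ∧ (10 : Int) ^ (digitLen n - 1).toNat ≤ n ∧ n < 10 ^ (digitLen n).toNat :=
  digitLen_bounds_aux n.toNat n h le_rfl

-- A's loop body as a function of i alone
def gA (i : Int) : Int :=
  if i < 10 then i
  else (PySem.Int.ofChars? [PySem.List.pyGetD (PySem.Int.toStr i).toList 0 ' ']).getD 0
     + (PySem.Int.ofChars? [PySem.List.pyGetD (PySem.Int.toStr i).toList 1 ' ']).getD 0

theorem gA_eq_scontrib (i : Int) (h : 10 ≤ i) : gA i = scontrib i := by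
  unfold gA scontrib
  rw [if_neg (by omega), PySem.Int.toList_toStr, PySem.List.pyGetD_zero,
      (by norm_cast : (1 : Int) = ((1 : Nat) : Int)), PySem.List.pyGetD_natCast]

theorem sum_gA_lt10 : ((PySem.List.pyRange 0 10 1).map gA).sum = 45 := by decide

-- ===== VERDICT (by name: the statement is the Claim_ definition above) =====
theorem DaysSum_spec : Claim_equal_DaysSum := by
  intro Days _
  unfold Spec_DaysSum DaysSum DaysSum_alt
  by_cases hneg : Days < 0
  · rw [if_pos (by omega : Days < 10), if_neg (by omega : ¬ (0 ≤ Days)),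
        PySem.List.pyRange_one_eq_nil (by omega)]
    rfl
  · by_cases hsmall : Days < 10
    · have h0 : 0 ≤ Days := by omega
      interval_cases Days <;> decide
    · rw [if_neg hsmall]
      -- A's side: the loop is the sum of gA over [0, Days+1)
      have hfun : (fun (temp i : Int) =>
          if i < 10 then temp + i
          else
            let Daysstr := PySem.Int.toStr i
            let Dayssymb := Daysstr.toList
            temp + (PySem.Int.ofChars? [PySem.List.pyGetD Dayssymb 0 ' ']).getD 0
                 + (PySem.Int.ofChars? [PySem.List.pyGetD Dayssymb 1 ' ']).getD 0)
          = fun (temp i : Int) => temp + gA i := by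
        funext temp i
        by_cases h : i < 10
        · simp [gA, if_pos h]
        · simp only [gA, if_neg h]
          ring
      rw [hfun, PySem.List.foldl_add,
          PySem.List.pyRange_one_append 0 10 (Days + 1) (by norm_num) (by omega),
          List.map_append, List.sum_append, sum_gA_lt10]
      have hsum2 : ((PySem.List.pyRange 10 (Days + 1) 1).map gA).sum = S 10 (Days + 1) := by
        unfold S
        exact congrArg List.sum (List.map_congr_left (fun i hi => by
          rw [PySem.List.mem_pyRange_one] at hi
          exact gA_eq_scontrib i hi.1))
      rw [hsum2]
      -- B's side: the level loop accumulates S 10 (Days+1)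
      obtain ⟨hL1, hL2, hL3⟩ := digitLen_bounds Days (by omega)
      set K : Nat := (digitLen Days - 1).toNat with hK
      have hKc : digitLen Days - 1 = (K : Int) := by omega
      rw [hKc, outer_loop Days (by omega) K 45]
      have hexp : K + 1 = (digitLen Days).toNat := by omega
      rw [hexp]
      have hmin : min (Days + 1) ((10 : Int) ^ (digitLen Days).toNat) = Days + 1 := by omega
      rw [hmin]
      ring
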